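-- pv_equiv track=rewrite | github.com/psrpsj/Algorithm | week02/약수의 개수와 덧셈/sangryu.py | find_even
-- ===== SOURCE A (Python) =====
-- def find_even(num):
--     divisor = []
--     for i in range(1, num+1):
--         if num % i == 0:
--             divisor.append(i)
--     if len(divisor) % 2 == 0:
--         return True
--     else:
--         return False
-- ===== SOURCE B (Python) =====
-- def find_even(num):
--     if num <= 0:
--         return True
--     r = 0
--     while (r + 1) * (r + 1) <= num:
--         r += 1
--     return r * r != num
-- ===== Notes on version B (the rewrite author's own statement) =====
-- stated objective: faster
-- what changed: Instead of enumerating every i in 1..num and counting divisors, B computes the integer square root with an O(sqrt(num)) loop and returns True iff num is not a perfect square (divisors pair up d <-> num/d, so the count is odd exactly for squares).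
import Mathlib
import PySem

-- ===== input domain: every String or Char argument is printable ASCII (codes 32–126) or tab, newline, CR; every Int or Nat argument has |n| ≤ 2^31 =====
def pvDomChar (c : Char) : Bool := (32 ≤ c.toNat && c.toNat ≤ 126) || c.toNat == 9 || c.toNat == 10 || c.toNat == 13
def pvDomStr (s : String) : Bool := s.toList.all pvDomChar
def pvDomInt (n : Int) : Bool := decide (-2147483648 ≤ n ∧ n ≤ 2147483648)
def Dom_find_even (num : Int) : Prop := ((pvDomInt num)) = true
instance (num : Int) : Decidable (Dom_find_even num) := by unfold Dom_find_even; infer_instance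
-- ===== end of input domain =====

-- B replaces A's O(num) scan over all candidate divisors by an O(sqrt(num)) integer-square-root
-- loop: a positive integer has an even number of divisors iff it is not a perfect square.

-- ===== PORT A =====
def find_even (num : Int) : Bool :=
  let divisor : List Int :=
    (PySem.List.pyRange 1 (num + 1) 1).foldl
      (fun acc i => if PySem.Int.mod num i == 0 then acc ++ [i] else acc) []
  if divisor.length % 2 == 0 then true else false

-- ===== PORT B =====
-- B's 'while (r+1)*(r+1) <= num: r += 1' loop
def findEvenSqrtLoop (num r : Int) : Int :=
  if (r + 1) * (r + 1) ≤ num then findEvenSqrtLoop num (r + 1) else r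
termination_by (num - r).toNat
decreasing_by
  have h0 : 0 ≤ (r + 1) * (r + 1) := mul_self_nonneg _
  have h2 : 0 ≤ r * r := mul_self_nonneg r
  have h3 : (r + 1) * (r + 1) = r * r + 2 * r + 1 := by ring
  omega

def find_even_alt (num : Int) : Bool :=
  if num ≤ 0 then true
  else
    let r := findEvenSqrtLoop num 0
    !(r * r == num)

-- ===== PRECONDITION & SPEC =====
def Spec_find_even (num : Int) (out : Bool) : Prop := out = find_even_alt num
instance (num : Int) (out : Bool) : Decidable (Spec_find_even num out) := by unfold Spec_find_even; infer_instance

-- ===== CLAIM (what is proved, stated in full; the proofs are below) =====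
def Claim_equal_find_even : Prop := ∀ (num : Int), Dom_find_even num → Spec_find_even num (find_even num)

-- ===== LEMMAS AND PROOFS =====

-- The square-root loop returns the integer square root.
theorem findEvenSqrtLoop_spec (num r : Int) (hr : 0 ≤ r) (h : r * r ≤ num) :
    0 ≤ findEvenSqrtLoop num r ∧ findEvenSqrtLoop num r * findEvenSqrtLoop num r ≤ num ∧
      num < (findEvenSqrtLoop num r + 1) * (findEvenSqrtLoop num r + 1) := by
  fun_induction findEvenSqrtLoop num r with
  | case1 r hguard ih => exact ih (by omega) hguard
  | case2 r hguard => exact ⟨hr, h, not_le.mp hguard⟩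

-- #(range n filtered by p) = countP p (range n)
theorem card_filter_range (n : ℕ) (p : ℕ → Prop) [DecidablePred p] :
    ((Finset.range n).filter p).card = (List.range n).countP (fun k => decide (p k)) := by
  induction n with
  | zero => simp
  | succ n ih =>
    rw [Finset.range_add_one, Finset.filter_insert, List.range_succ, List.countP_append]
    by_cases hp : p n
    · rw [if_pos hp, Finset.card_insert_of_notMem (by simp), ih]; simp [hp]
    · rw [if_neg hp, ih]; simp [hp]

-- A's divisor count equals n.divisors.card
theorem card_divisors_eq_countP (n : ℕ) (hn : n ≠ 0) :
    n.divisors.card = (List.range n).countP (fun k => decide ((1 + k) ∣ n)) := by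
  rw [← card_filter_range n (fun k => (1 + k) ∣ n)]
  refine Finset.card_bij' (fun d _ => d - 1) (fun k _ => 1 + k) ?_ ?_ ?_ ?_
  · intro d hd
    obtain ⟨hdvd, -⟩ := Nat.mem_divisors.1 hd
    have h1 : 1 ≤ d := Nat.one_le_iff_ne_zero.2 (by rintro rfl; exact hn (zero_dvd_iff.1 hdvd))
    have h2 : d ≤ n := Nat.le_of_dvd (Nat.pos_of_ne_zero hn) hdvd
    simp only [Finset.mem_filter, Finset.mem_range]
    constructor
    · omega
    · have : 1 + (d - 1) = d := by omega
      rw [this]; exact hdvd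
  · intro k hk
    obtain ⟨-, hdvd⟩ := Finset.mem_filter.1 hk
    exact Nat.mem_divisors.2 ⟨hdvd, hn⟩
  · intro d hd
    obtain ⟨hdvd, -⟩ := Nat.mem_divisors.1 hd
    have h1 : 1 ≤ d := Nat.one_le_iff_ne_zero.2 (by rintro rfl; exact hn (zero_dvd_iff.1 hdvd))
    show 1 + (d - 1) = d
    omega
  · intro k _
    show (1 + k) - 1 = k
    omega

-- Divisors below and above the square root pair off via d ↦ n / d.
theorem card_filter_lt_eq_card_filter_gt (n : ℕ) (hn : n ≠ 0) :
    (n.divisors.filter (fun d => d * d < n)).card = (n.divisors.filter (fun d => n < d * d)).card := by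
  refine Finset.card_bij' (fun d _ => n / d) (fun d _ => n / d) ?_ ?_ ?_ ?_
  · intro d hd
    obtain ⟨hmem, hlt⟩ := Finset.mem_filter.1 hd
    obtain ⟨hdvd, -⟩ := Nat.mem_divisors.1 hmem
    obtain ⟨e, he⟩ := hdvd
    have hd0 : 0 < d := Nat.pos_of_ne_zero (by rintro rfl; exact hn (by simpa using he))
    have he0 : 0 < e := Nat.pos_of_ne_zero (by rintro rfl; exact hn (by simpa using he))
    have hnd : n / d = e := by rw [he, Nat.mul_div_cancel_left e hd0]
    have hde : d < e := by
      have : d * d < d * e := by rw [← he]; exact hlt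
      exact lt_of_mul_lt_mul_left this (Nat.zero_le d)
    refine Finset.mem_filter.2 ⟨Nat.mem_divisors.2 ⟨⟨d, by
      show n = n / d * d
      rw [hnd, he]; ring⟩, hn⟩, ?_⟩
    show n < n / d * (n / d)
    rw [hnd, he]
    exact (Nat.mul_lt_mul_right he0).mpr hde
  · intro d hd
    obtain ⟨hmem, hlt⟩ := Finset.mem_filter.1 hd
    obtain ⟨hdvd, -⟩ := Nat.mem_divisors.1 hmem
    obtain ⟨e, he⟩ := hdvd
    have hd0 : 0 < d := Nat.pos_of_ne_zero (by rintro rfl; exact hn (by simpa using he))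
    have he0 : 0 < e := Nat.pos_of_ne_zero (by rintro rfl; exact hn (by simpa using he))
    have hnd : n / d = e := by rw [he, Nat.mul_div_cancel_left e hd0]
    have hde : e < d := by
      have : d * e < d * d := by rw [← he]; exact hlt
      exact lt_of_mul_lt_mul_left this (Nat.zero_le d)
    refine Finset.mem_filter.2 ⟨Nat.mem_divisors.2 ⟨⟨d, by
      show n = n / d * d
      rw [hnd, he]; ring⟩, hn⟩, ?_⟩
    show n / d * (n / d) < n
    rw [hnd, he]
    exact (Nat.mul_lt_mul_right he0).mpr hde
  · intro d hd
    obtain ⟨hmem, -⟩ := Finset.mem_filter.1 hd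
    obtain ⟨hdvd, -⟩ := Nat.mem_divisors.1 hmem
    exact Nat.div_div_self hdvd hn
  · intro d hd
    obtain ⟨hmem, -⟩ := Finset.mem_filter.1 hd
    obtain ⟨hdvd, -⟩ := Nat.mem_divisors.1 hmem
    exact Nat.div_div_self hdvd hn

-- At most one divisor squares to n, namely Nat.sqrt n when n is a perfect square.
theorem card_filter_sq_eq (n : ℕ) (hn : n ≠ 0) :
    (n.divisors.filter (fun d => d * d = n)).card =
      if Nat.sqrt n * Nat.sqrt n = n then 1 else 0 := by
  split_ifs with h
  · rw [show n.divisors.filter (fun d => d * d = n) = {Nat.sqrt n} from ?_]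
    · exact Finset.card_singleton _
    · ext d
      simp only [Finset.mem_filter, Finset.mem_singleton, Nat.mem_divisors]
      constructor
      · rintro ⟨-, hdd⟩; rw [← hdd, Nat.sqrt_eq]
      · rintro rfl; exact ⟨⟨⟨Nat.sqrt n, h.symm⟩, hn⟩, h⟩
  · rw [Finset.card_eq_zero, Finset.filter_eq_empty_iff]
    intro d _ hdd
    exact h (by rw [← hdd, Nat.sqrt_eq])

-- Parity of the divisor count: even iff n is not a perfect square.
theorem even_card_divisors_iff (n : ℕ) (hn : n ≠ 0) :
    Even (n.divisors.card) ↔ Nat.sqrt n * Nat.sqrt n ≠ n := by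
  have hsplit1 := Finset.card_filter_add_card_filter_not (s := n.divisors) (p := fun d => d * d < n)
  have hsplit2 := Finset.card_filter_add_card_filter_not
    (s := n.divisors.filter (fun d => ¬ d * d < n)) (p := fun d => d * d = n)
  rw [Finset.filter_filter, Finset.filter_filter] at hsplit2
  have hcongr1 : n.divisors.filter (fun d => ¬ d * d < n ∧ d * d = n) =
      n.divisors.filter (fun d => d * d = n) := by
    apply Finset.filter_congr; intro d _; constructor
    · exact fun hx => hx.2
    · intro hx; exact ⟨by omega, hx⟩
  have hcongr2 : n.divisors.filter (fun d => ¬ d * d < n ∧ ¬ d * d = n) =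
      n.divisors.filter (fun d => n < d * d) := by
    apply Finset.filter_congr; intro d _; constructor
    · intro hx; omega
    · intro hx; omega
  rw [hcongr1, hcongr2] at hsplit2
  have hLU := card_filter_lt_eq_card_filter_gt n hn
  have hE := card_filter_sq_eq n hn
  rw [Nat.even_iff]
  split_ifs at hE with h
  · simp only [h, ne_eq, not_true_eq_false, iff_false]
    omega
  · simp only [h, ne_eq, not_false_eq_true, iff_true]
    omega

-- A's port, unfolded to a parity statement about n = num.toNat, for positive num.
theorem find_even_pos (num : Int) (hpos : 0 < num) :
    find_even num = decide (Even (num.toNat.divisors.card)) := by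
  have hn : num.toNat ≠ 0 := by omega
  have hnum : (num.toNat : Int) = num := Int.toNat_of_nonneg (by omega)
  unfold find_even
  rw [PySem.List.foldl_append_if_eq_filter, PySem.List.pyRange_one]
  have hcast : ((num + 1 - 1).toNat) = num.toNat := by omega
  rw [hcast]
  simp only [List.nil_append, List.filter_map, List.length_map,
    ← List.countP_eq_length_filter, Function.comp_def]
  have hcnt : (List.range num.toNat).countP
        (fun (k : ℕ) => PySem.Int.mod num (1 + (k : Int)) == 0) =
      (List.range num.toNat).countP (fun k => decide ((1 + k) ∣ num.toNat)) := by
    apply List.countP_congr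
    intro k _
    have hiff : PySem.Int.mod num (1 + (k : Int)) = 0 ↔ (1 + k) ∣ num.toNat := by
      rw [PySem.Int.mod_eq_zero_iff_dvd, ← hnum]
      constructor
      · intro hd; exact_mod_cast hd
      · intro hd; exact_mod_cast hd
    simp [hiff]
  rw [hcnt, ← card_divisors_eq_countP num.toNat hn]
  rcases Nat.even_or_odd (num.toNat.divisors.card) with he | ho
  · simp [Nat.even_iff.1 he, he]
  · have := Nat.odd_iff.1 ho
    simp [this, Nat.not_even_iff_odd.2 ho]

-- ===== VERDICT (by name: the statement is the Claim_ definition above) =====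
theorem find_even_spec : Claim_equal_find_even := by
  unfold Claim_equal_find_even Spec_find_even
  intro num _
  by_cases hle : num ≤ 0
  · -- empty range on A's side, the guard on B's side
    unfold find_even find_even_alt
    rw [PySem.List.pyRange_one_eq_nil (by omega)]
    simp [hle]
  · rw [not_le] at hle
    obtain ⟨hs0, hs1, hs2⟩ := findEvenSqrtLoop_spec num 0 le_rfl (by simpa using hle.le)
    set s := findEvenSqrtLoop num 0 with hsdef
    have hnum : (num.toNat : Int) = num := Int.toNat_of_nonneg (by omega)
    have hscast : ((s.toNat : Int)) = s := Int.toNat_of_nonneg hs0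
    have hsqrt : s.toNat = Nat.sqrt num.toNat := by
      have h1 : s.toNat ≤ Nat.sqrt num.toNat := Nat.le_sqrt.2 (by
        have : (↑(s.toNat * s.toNat) : Int) ≤ (num.toNat : Int) := by
          push_cast; rw [hscast, hnum]; exact hs1
        exact_mod_cast this)
      have h2 : Nat.sqrt num.toNat < s.toNat + 1 := Nat.sqrt_lt.2 (by
        have : (num.toNat : Int) < ((s.toNat + 1) * (s.toNat + 1) : ℕ) := by
          push_cast; rw [hscast, hnum]; exact hs2
        exact_mod_cast this)
      omega
    rw [find_even_pos num hle]
    unfold find_even_alt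
    rw [if_neg (by omega)]
    rw [← hsdef]
    have hiff : (s * s = num) ↔ (Nat.sqrt num.toNat * Nat.sqrt num.toNat = num.toNat) := by
      rw [← hsqrt, ← hscast, ← hnum]
      constructor
      · intro h; exact_mod_cast h
      · intro h; exact_mod_cast h
    have hDev : Even num.toNat.divisors.card ↔ ¬ (s * s = num) :=
      (even_card_divisors_iff num.toNat (by omega)).trans (not_congr hiff).symm
    by_cases hss : s * s = num
    · simp [hDev, hss]
    · simp [hDev, hss]
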